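-- pv_equiv track=rewrite | github.com/crescentfull/cotingTest | 프로그래머스/test/보물찾기/code2.py | treasure_hunt
-- ===== SOURCE A (Python) =====
-- def treasure_hunt(n, resources):
--     m = len(resources)  # 탐험가의 수
--     result = []  # 결과 리스트 (각 라운드에서 보물을 차지한 탐험가의 남은 자원)
--
--     for _ in range(n):
--         # 자원이 가장 많은 탐험가 선택
--         max_resource = -1
--         chosen_explorer = -1
--
--         for i in range(m):
--             if resources[i] > max_resource:
--                 max_resource = resources[i]
--                 chosen_explorer = i
--             elif resources[i] == max_resource and i < chosen_explorer:
--                 chosen_explorer = i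
--
--         # 선택된 탐험가의 남은 자원을 기록 (현재 자원에서 1 감소 후 남은 자원)
--         resources[chosen_explorer] -= 1
--         result.append(resources[chosen_explorer] + 1)  # 남은 자원을 기록
--
--     return result
-- ===== SOURCE B (Python) =====
-- def treasure_hunt(n, resources):
--     pool = sorted(resources, reverse=True)
--     result = []
--     for _ in range(n):
--         top, rest = pool[0], pool[1:]
--         result.append(top)
--         k = 0
--         while k < len(rest) and rest[k] > top - 1:
--             k += 1
--         pool = rest[:k] + [top - 1] + rest[k:]
--     return result
-- ===== Notes on version B (the rewrite author's own statement) =====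
-- stated objective: alternative
-- what changed: B sorts the resources once in descending order and keeps the pool sorted by reinserting the decremented value right after the run of equal maxima, instead of A's full linear argmax rescan of the whole list on every round.
-- intended difference: On lists of length >= 2, once every resource is below 0 and the wrapped-around last explorer no longer holds the maximum (n > sum(x+1 for x >= 0) + the rounds on which the last explorer still ties the maximum), A's scan (initialised with max_resource = -1) finds no explorer, so chosen_explorer stays -1 and A decrements and records the LAST explorer via negative-index wraparound, while B records the true current maximum, which is the intended behaviour. — e.g. on treasure_hunt(1, [-2, -5]): A returns [-5], B returns [-2]
import Mathlib
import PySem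

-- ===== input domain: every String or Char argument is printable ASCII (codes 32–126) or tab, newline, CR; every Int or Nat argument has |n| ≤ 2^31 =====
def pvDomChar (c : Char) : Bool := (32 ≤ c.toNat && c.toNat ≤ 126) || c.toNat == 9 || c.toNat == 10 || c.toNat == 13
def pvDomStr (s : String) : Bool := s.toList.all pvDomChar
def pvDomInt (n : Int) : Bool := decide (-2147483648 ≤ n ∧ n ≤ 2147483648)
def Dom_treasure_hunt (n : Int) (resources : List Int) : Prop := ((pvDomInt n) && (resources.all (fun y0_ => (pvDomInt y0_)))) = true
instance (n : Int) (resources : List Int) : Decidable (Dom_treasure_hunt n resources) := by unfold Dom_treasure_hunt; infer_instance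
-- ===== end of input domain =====

-- B sorts once (descending) and reinserts the decremented value after the run of tied maxima,
-- instead of A's full argmax rescan each round (alternative decomposition, same worst-case cost).
-- A mutates its `resources` argument in place; B does not — the equivalence proved here is about the return value only.
-- Intended difference (D_): on lists of length ≥ 2 with n exceeding sum(x+1 for x ≥ 0), A's scan
-- (initialised with -1) finds nobody once all resources are ≤ -1, wraps to index -1 and records the
-- LAST explorer, while B records the true current maximum, which is the intended behaviour.


-- ===== PORT A =====
-- inner `for i in range(m)` scan: state (max_resource, chosen_explorer)
def tfun (resources : List Int) (st : Int × Int) (i : Int) : Int × Int :=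
  match PySem.List.pyGet? resources i with
  | some v =>
      if v > st.1 then (v, i)
      else if v = st.1 ∧ i < st.2 then (st.1, i)
      else st
  | none => st   -- unreachable: i ∈ range(len(resources))

def tscan (resources : List Int) : Int × Int :=
  (PySem.List.pyRange 0 (resources.length : Int) 1).foldl (tfun resources) (-1, -1)

-- one round: pick, decrement `resources[chosen]`, append `resources[chosen] + 1`
def tstep (resources result : List Int) : List Int × List Int :=
  let ch := (tscan resources).2
  match PySem.List.pyGet? resources ch with
  | none => (resources, result)   -- IndexError (empty list), outside Pre_
  | some v =>
      let r' := PySem.List.pySetD resources ch (v - 1)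
      match PySem.List.pyGet? r' ch with
      | none => (r', result)      -- unreachable
      | some w => (r', result ++ [w + 1])

def tloop : Nat → List Int → List Int → List Int × List Int
  | 0, rs, res => (rs, res)
  | k + 1, rs, res =>
      let p := tstep rs res
      tloop k p.1 p.2

def treasure_hunt (n : Int) (resources : List Int) : List Int :=
  (tloop n.toNat resources []).2

-- ===== PORT B =====
-- `while k < len(rest) and rest[k] > top - 1: k += 1`
def bk (top : Int) : List Int → Nat
  | [] => 0
  | x :: xs => if x > top - 1 then bk top xs + 1 else 0

-- one round: top = pool[0]; record top; pool = rest[:k] + [top-1] + rest[k:]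
def bstep (pool result : List Int) : List Int × List Int :=
  match pool with
  | [] => (pool, result)          -- pool[0] IndexError (empty list), outside Pre_
  | top :: rest =>
      let k := bk top rest
      (rest.take k ++ (top - 1) :: rest.drop k, result ++ [top])

def bloop : Nat → List Int → List Int → List Int × List Int
  | 0, pool, res => (pool, res)
  | j + 1, pool, res =>
      let p := bstep pool res
      bloop j p.1 p.2

def treasure_hunt_alt (n : Int) (resources : List Int) : List Int :=
  (bloop n.toNat (PySem.List.sorted resources (fun x => x) true) []).2

-- ===== PRECONDITION & SPEC =====
-- A raises IndexError (resources[-1] on the empty list) iff resources = [] and n ≥ 1; nothing else is excluded.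
def Pre_treasure_hunt (n : Int) (resources : List Int) : Prop := resources ≠ [] ∨ n ≤ 0
instance (n : Int) (resources : List Int) : Decidable (Pre_treasure_hunt n resources) := by unfold Pre_treasure_hunt; infer_instance
def pvWitness_treasure_hunt : Int × List Int := (2, [3, 1])

-- rounds before A's scan fails: sum(x+1 for x >= 0) plus the extra rounds on which the
-- wrapped-around last explorer still happens to hold the maximum (resources clamped to <= -1)
def potFn (rs : List Int) : Nat :=
  let s := rs.map (fun x => min x (-1))
  (rs.map (fun x => (x + 1).toNat)).sum + (s.getLastD 0 - s.dropLast.max?.getD 0 + 1).toNat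

-- On lists of length ≥ 2, once every resource is below 0 and the wrapped index -1 no longer holds the
-- maximum, A's scan (initialised with -1) finds no explorer, wraps to index -1 and decrements/records
-- the LAST explorer, while B records the true current maximum, which is the intended behaviour.
def D_treasure_hunt (n : Int) (resources : List Int) : Prop :=
  2 ≤ resources.length ∧ (potFn resources : Int) < n
instance (n : Int) (resources : List Int) : Decidable (D_treasure_hunt n resources) := by unfold D_treasure_hunt; infer_instance

def Spec_treasure_hunt (n : Int) (resources : List Int) (out : List Int) : Prop :=
  ¬ D_treasure_hunt n resources → out = treasure_hunt_alt n resources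
instance (n : Int) (resources : List Int) (out : List Int) : Decidable (Spec_treasure_hunt n resources out) := by unfold Spec_treasure_hunt; infer_instance

def pvDiffWitness_treasure_hunt : Int × List Int := (1, [-2, -5])
def pvDiffWitnessOut_treasure_hunt : (List Int) × (List Int) := ([-5], [-2])

-- ===== CLAIM (what is proved, stated in full; the proofs are below) =====
def Claim_unchanged_treasure_hunt : Prop := ∀ (n : Int) (resources : List Int), Dom_treasure_hunt n resources → Pre_treasure_hunt n resources → Spec_treasure_hunt n resources (treasure_hunt n resources)
def Claim_changed_treasure_hunt : Prop := Dom_treasure_hunt (pvDiffWitness_treasure_hunt.1) (pvDiffWitness_treasure_hunt.2) ∧ Pre_treasure_hunt (pvDiffWitness_treasure_hunt.1) (pvDiffWitness_treasure_hunt.2) ∧ D_treasure_hunt (pvDiffWitness_treasure_hunt.1) (pvDiffWitness_treasure_hunt.2) ∧ treasure_hunt (pvDiffWitness_treasure_hunt.1) (pvDiffWitness_treasure_hunt.2) = pvDiffWitnessOut_treasure_hunt.1 ∧ treasure_hunt_alt (pvDiffWitness_treasure_hunt.1) (pvDiffWitness_treasure_hunt.2) = pvDiffWitnessOut_treasure_hunt.2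 ∧ pvDiffWitnessOut_treasure_hunt.1 ≠ pvDiffWitnessOut_treasure_hunt.2

def Claim_exact_treasure_hunt : Prop := ∀ (n : Int) (resources : List Int), Dom_treasure_hunt n resources → Pre_treasure_hunt n resources → D_treasure_hunt n resources → treasure_hunt n resources ≠ treasure_hunt_alt n resources

-- ===== LEMMAS AND PROOFS =====

def capFn (rs : List Int) : Nat := (rs.map (fun x => (x + 1).toNat)).sum
def clampv (x : Int) : Int := min x (-1)
def svec (rs : List Int) : List Int := rs.map clampv
def maxD : List Int → Int
  | [] => 0
  | x :: xs => if xs = [] then x else max x (maxD xs)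
def tvalFn (rs : List Int) : Int := (svec rs).getLastD 0
def ovalFn (rs : List Int) : Int := maxD ((svec rs).dropLast)
def slackFn (rs : List Int) : Nat :=
  if ovalFn rs ≤ tvalFn rs then (tvalFn rs - ovalFn rs + 1).toNat else 0

theorem foldl_max_init : ∀ (t : List Int) (a b : Int), t.foldl max (max a b) = max a (t.foldl max b) := by
  intro t
  induction t with
  | nil => intro a b; rfl
  | cons c t' ih =>
    intro a b
    show t'.foldl max (max (max a b) c) = max a ((c :: t').foldl max b)
    rw [max_assoc, ih]
    rfl

theorem maxD_eq_foldl : ∀ (xs : List Int) (x : Int), maxD (x :: xs) = xs.foldl max x := by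
  intro xs
  induction xs with
  | nil => intro x; rfl
  | cons y t ih =>
    intro x
    rw [maxD, if_neg (by simp : ¬ (y :: t) = []), ih y]
    show max x (t.foldl max y) = t.foldl max (max x y)
    rw [foldl_max_init]

theorem max?_getD_eq_maxD : ∀ (l : List Int), l.max?.getD 0 = maxD l := by
  intro l
  cases l with
  | nil => rfl
  | cons x xs =>
    have h : (x :: xs).max? = some (xs.foldl max x) := rfl
    rw [h, Option.getD_some, maxD_eq_foldl]

theorem potFn_eq (rs : List Int) : potFn rs = capFn rs + slackFn rs := by
  unfold potFn capFn slackFn tvalFn ovalFn svec clampv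
  dsimp only
  rw [max?_getD_eq_maxD]
  by_cases h : maxD ((rs.map (fun x => min x (-1))).dropLast) ≤ (rs.map (fun x => min x (-1))).getLastD 0
  · rw [if_pos h]
  · rw [if_neg h]
    omega

theorem capFn_cons (a : Int) (l : List Int) : capFn (a :: l) = (a + 1).toNat + capFn l := by
  simp [capFn]

theorem capFn_pos_exists {rs : List Int} (h : 0 < capFn rs) : ∃ x ∈ rs, 0 ≤ x := by
  induction rs with
  | nil => simp [capFn] at h
  | cons a t ih =>
    rw [capFn_cons] at h
    by_cases ha : 0 ≤ a
    · exact ⟨a, List.mem_cons_self, ha⟩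
    · have h0 : (a + 1).toNat = 0 := by omega
      obtain ⟨x, hx, hx0⟩ := ih (by omega)
      exact ⟨x, List.mem_cons_of_mem _ hx, hx0⟩

theorem capFn_perm {xs ys : List Int} (h : xs.Perm ys) : capFn xs = capFn ys :=
  (h.map _).sum_eq

-- invariant of A's inner scan after the first t indices
def ScanInv (rs : List Int) (t : Nat) (st : Int × Int) : Prop :=
  -1 ≤ st.1 ∧ (∀ y ∈ rs.take t, y ≤ st.1) ∧
  ((st.1 = -1 ∧ st.2 = -1) ∨
    (∃ c : Nat, st.2 = (c : Int) ∧ c < t ∧ PySem.List.pyGet? rs (c : Int) = some st.1))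

theorem tscan_go (rs : List Int) : ∀ (fuel t : Nat) (st : Int × Int),
    fuel = rs.length - t → t ≤ rs.length → ScanInv rs t st →
    ScanInv rs rs.length ((PySem.List.pyRange (t : Int) (rs.length : Int) 1).foldl (tfun rs) st) := by
  intro fuel
  induction fuel with
  | zero =>
    intro t st hf ht hinv
    have hte : t = rs.length := by omega
    subst hte
    rw [PySem.List.pyRange_one_eq_nil (le_refl _)]
    simpa using hinv
  | succ f ih =>
    intro t st hf ht hinv
    have htlt : t < rs.length := by omega
    rw [PySem.List.pyRange_one_cons (show (t : Int) < (rs.length : Int) by exact_mod_cast htlt), List.foldl_cons]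
    obtain ⟨hge, hall, hbr⟩ := hinv
    have hgt : PySem.List.pyGet? rs (t : Int) = some rs[t] := by
      rw [PySem.List.pyGet?_natCast, List.getElem?_eq_getElem htlt]
    have htake : rs.take (t + 1) = rs.take t ++ [rs[t]] := by
      rw [List.take_add_one, List.getElem?_eq_getElem htlt]; rfl
    have hstep : ScanInv rs (t + 1) (tfun rs st (t : Int)) := by
      unfold tfun
      rw [hgt]
      by_cases h1 : rs[t] > st.1
      · simp only [if_pos h1]
        refine ⟨by omega, ?_, Or.inr ⟨t, rfl, by omega, hgt⟩⟩
        intro y hy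
        rw [htake] at hy
        rcases List.mem_append.1 hy with hy | hy
        · exact le_of_lt (lt_of_le_of_lt (hall y hy) h1)
        · simp at hy; omega
      · simp only [if_neg h1]
        have h2 : ¬ (rs[t] = st.1 ∧ (t : Int) < st.2) := by
          rintro ⟨-, hlt⟩
          rcases hbr with ⟨-, hc⟩ | ⟨c, hc, hct, -⟩
          · rw [hc] at hlt; omega
          · rw [hc] at hlt
            have : (t : Int) < (c : Int) := hlt
            have : t < c := by exact_mod_cast this
            omega
        simp only [if_neg h2]
        refine ⟨hge, ?_, ?_⟩
        · intro y hy
          rw [htake] at hy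
          rcases List.mem_append.1 hy with hy | hy
          · exact hall y hy
          · simp at hy; omega
        · rcases hbr with h | ⟨c, hc, hct, hv⟩
          · exact Or.inl h
          · exact Or.inr ⟨c, hc, by omega, hv⟩
    have hf2 : f = rs.length - (t + 1) := by clear hstep htake hgt hbr hall hge; omega
    have := ih (t + 1) (tfun rs st (t : Int)) hf2 (by omega) hstep
    have hcast : ((t : Int) + 1) = ((t + 1 : Nat) : Int) := by push_cast; ring
    rw [hcast]
    exact this

theorem tscan_spec (rs : List Int) (hx : ∃ x ∈ rs, 0 ≤ x) :
    ∃ c : Nat, (tscan rs).2 = (c : Int) ∧ c < rs.length ∧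
      PySem.List.pyGet? rs (c : Int) = some (tscan rs).1 ∧
      (∀ y ∈ rs, y ≤ (tscan rs).1) ∧ 0 ≤ (tscan rs).1 := by
  have h0 : ScanInv rs 0 (-1, -1) := ⟨le_refl _, by simp, Or.inl ⟨rfl, rfl⟩⟩
  have h := tscan_go rs (rs.length - 0) 0 (-1, -1) rfl (Nat.zero_le _) h0
  have hsc : tscan rs = (PySem.List.pyRange ((0 : Nat) : Int) (rs.length : Int) 1).foldl (tfun rs) (-1, -1) := by
    simp [tscan]
  rw [← hsc] at h
  obtain ⟨hge, hall, hbr⟩ := h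
  rw [List.take_length] at hall
  obtain ⟨x, hxm, hx0⟩ := hx
  have hM : 0 ≤ (tscan rs).1 := le_trans hx0 (hall x hxm)
  rcases hbr with ⟨hm, -⟩ | ⟨c, hc, hct, hv⟩
  · omega
  · exact ⟨c, hc, hct, hv, hall, hM⟩

theorem set_perm_cons_eraseIdx : ∀ (xs : List Int) (n : Nat) (v : Int), n < xs.length →
    (xs.set n v).Perm (v :: xs.eraseIdx n)
  | a :: t, 0, v, _ => by simp
  | a :: t, n + 1, v, h => by
    simp only [List.set_cons_succ, List.eraseIdx_cons_succ]
    exact ((set_perm_cons_eraseIdx t n v (by simpa using h)).cons a).trans (List.Perm.swap v a _)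

theorem perm_cons_eraseIdx : ∀ (xs : List Int) (n : Nat) (w : Int), xs[n]? = some w →
    xs.Perm (w :: xs.eraseIdx n)
  | a :: t, 0, w, h => by
    simp only [List.getElem?_cons_zero, Option.some.injEq] at h
    subst h; simp
  | a :: t, n + 1, w, h => by
    simp only [List.getElem?_cons_succ] at h
    simp only [List.eraseIdx_cons_succ]
    exact ((perm_cons_eraseIdx t n w h).cons a).trans (List.Perm.swap w a _)

theorem tstep_spec (rs res : List Int) (hx : ∃ x ∈ rs, 0 ≤ x) :
    ∃ c : Nat, c < rs.length ∧ PySem.List.pyGet? rs (c : Int) = some (tscan rs).1 ∧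
      (∀ y ∈ rs, y ≤ (tscan rs).1) ∧ 0 ≤ (tscan rs).1 ∧
      tstep rs res = (rs.set c ((tscan rs).1 - 1), res ++ [(tscan rs).1]) := by
  obtain ⟨c, hc2, hclen, hget, hall, hM⟩ := tscan_spec rs hx
  refine ⟨c, hclen, hget, hall, hM, ?_⟩
  unfold tstep
  dsimp only
  rw [hc2, hget]
  dsimp only
  rw [PySem.List.pySetD_natCast]
  have hre : PySem.List.pyGet? (rs.set c ((tscan rs).1 - 1)) (c : Int) = some ((tscan rs).1 - 1) := by
    rw [PySem.List.pyGet?_natCast]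
    simp [hclen]
  rw [hre]
  dsimp only
  have he : (tscan rs).1 - 1 + 1 = (tscan rs).1 := by omega
  rw [he]

theorem bstep_pool : ∀ (top : Int) (rest : List Int),
    (top :: rest).Pairwise (fun a b => b ≤ a) →
    (rest.take (bk top rest) ++ (top - 1) :: rest.drop (bk top rest)).Perm ((top - 1) :: rest) ∧
    (rest.take (bk top rest) ++ (top - 1) :: rest.drop (bk top rest)).Pairwise (fun a b => b ≤ a)
  | top, [], hs => by
    simp [bk, List.Pairwise.nil]
  | top, x :: xs, hs => by
    have hxle : ∀ y ∈ x :: xs, y ≤ top := (List.pairwise_cons.1 hs).1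
    have htail : (x :: xs).Pairwise (fun a b => b ≤ a) := (List.pairwise_cons.1 hs).2
    by_cases hx : x > top - 1
    · have hsub : (top :: xs).Pairwise (fun a b => b ≤ a) := by
        refine List.Pairwise.sublist ?_ hs
        exact List.Sublist.cons₂ top (List.sublist_cons_self x xs)
      obtain ⟨ihp, ihs⟩ := bstep_pool top xs hsub
      rw [bk]
      simp only [if_pos hx, List.take_succ_cons, List.drop_succ_cons, List.cons_append]
      constructor
      · exact ((ihp.cons x).trans (List.Perm.swap (top - 1) x _))
      · rw [List.pairwise_cons]
        refine ⟨?_, ihs⟩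
        intro y hy
        rcases List.mem_cons.1 (ihp.mem_iff.1 hy) with hy | hy
        · omega
        · exact (List.pairwise_cons.1 htail).1 y hy
    · rw [bk]
      simp only [if_neg hx, List.take_zero, List.drop_zero, List.nil_append]
      refine ⟨List.Perm.refl _, ?_⟩
      rw [List.pairwise_cons]
      refine ⟨?_, htail⟩
      intro y hy
      rcases List.mem_cons.1 hy with hy | hy
      · omega
      · have := (List.pairwise_cons.1 htail).1 y hy
        omega


-- ===== exhausted-phase helpers =====

theorem le_maxD : ∀ (l : List Int), ∀ a ∈ l, a ≤ maxD l := by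
  intro l
  induction l with
  | nil => intro a ha; cases ha
  | cons x xs ih =>
    intro a ha
    rw [maxD]
    by_cases hx : xs = []
    · rw [if_pos hx]
      subst hx
      rcases List.mem_cons.1 ha with h | h
      · omega
      · cases h
    · rw [if_neg hx]
      rcases List.mem_cons.1 ha with h | h
      · subst h; exact le_max_left _ _
      · exact le_trans (ih a h) (le_max_right _ _)

theorem maxD_mem : ∀ (l : List Int), l ≠ [] → maxD l ∈ l := by
  intro l
  induction l with
  | nil => intro h; exact absurd rfl h
  | cons x xs ih =>
    intro _
    rw [maxD]
    by_cases hx : xs = []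
    · rw [if_pos hx]; exact List.mem_cons_self
    · rw [if_neg hx]
      rcases max_choice x (maxD xs) with h | h
      · rw [h]; exact List.mem_cons_self
      · rw [h]; exact List.mem_cons_of_mem _ (ih hx)

theorem capFn_eq_zero {rs : List Int} : capFn rs = 0 ↔ ∀ x ∈ rs, x ≤ -1 := by
  induction rs with
  | nil => simp [capFn]
  | cons a t ih =>
    rw [capFn_cons]
    constructor
    · intro h x hx
      rcases List.mem_cons.1 hx with h1 | h1
      · subst h1; omega
      · exact ih.1 (by omega) x h1
    · intro h
      have h1 : (a + 1).toNat = 0 := by have := h a List.mem_cons_self; omega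
      have h2 : capFn t = 0 := ih.2 (fun x hx => h x (List.mem_cons_of_mem _ hx))
      omega

theorem svec_eq_self {rs : List Int} (h : ∀ x ∈ rs, x ≤ -1) : svec rs = rs := by
  unfold svec
  induction rs with
  | nil => rfl
  | cons a t ih =>
    rw [List.map_cons]
    have ha : clampv a = a := by
      unfold clampv
      have := h a List.mem_cons_self
      omega
    rw [ha, ih (fun x hx => h x (List.mem_cons_of_mem _ hx))]

theorem set_eq_self : ∀ (xs : List Int) (n : Nat) (w : Int), xs[n]? = some w → xs.set n w = xs
  | a :: t, 0, w, h => by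
    simp only [List.getElem?_cons_zero, Option.some.injEq] at h
    subst h; rfl
  | a :: t, n + 1, w, h => by
    simp only [List.getElem?_cons_succ] at h
    simp only [List.set_cons_succ]
    rw [set_eq_self t n w h]

theorem svec_set {rs : List Int} {c : Nat} {M : Int} (hg : rs[c]? = some M) (hM : 0 ≤ M) :
    svec (rs.set c (M - 1)) = svec rs := by
  unfold svec
  rw [List.map_set]
  have h1 : clampv (M - 1) = -1 := by unfold clampv; omega
  have h2 : (rs.map clampv)[c]? = some (-1) := by
    rw [List.getElem?_map, hg]
    have : clampv M = -1 := by unfold clampv; omega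
    simp [this]
  rw [h1, set_eq_self _ _ _ h2]

theorem slack_congr {a b : List Int} (h : svec a = svec b) : slackFn a = slackFn b := by
  unfold slackFn tvalFn ovalFn
  rw [h]

theorem tfun_neg {rs : List Int} (h : ∀ x ∈ rs, x ≤ -1) :
    ∀ l : List Int, (∀ i ∈ l, (0 : Int) ≤ i) → l.foldl (tfun rs) (-1, -1) = (-1, -1) := by
  intro l
  induction l with
  | nil => intro _; rfl
  | cons i t ih =>
    intro hm
    rw [List.foldl_cons]
    have hstep : tfun rs (-1, -1) i = (-1, -1) := by
      unfold tfun
      cases hg : PySem.List.pyGet? rs i with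
      | none => rfl
      | some v =>
        have hv : v ≤ -1 := h v (PySem.List.mem_of_pyGet?_eq_some _ hg)
        have hi : (0 : Int) ≤ i := hm i List.mem_cons_self
        have h1 : ¬ v > ((-1 : Int), (-1 : Int)).1 := by dsimp only; omega
        have h2 : ¬ (v = ((-1 : Int), (-1 : Int)).1 ∧ i < ((-1 : Int), (-1 : Int)).2) := by
          dsimp only
          rintro ⟨h3, h4⟩
          omega
        dsimp only
        rw [if_neg h1, if_neg h2]
    rw [hstep]
    exact ih (fun j hj => hm j (List.mem_cons_of_mem _ hj))

theorem tscan_all_neg {rs : List Int} (h : ∀ x ∈ rs, x ≤ -1) : tscan rs = (-1, -1) := by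
  unfold tscan
  apply tfun_neg h
  intro i hi
  have := PySem.List.mem_pyRange_one.1 hi
  omega

theorem pyIdx?_neg_one (n : Nat) (h : 1 ≤ n) : PySem.List.pyIdx? n (-1) = some (n - 1) := by
  simp [PySem.List.pyIdx?]
  omega

theorem pySetD_neg_one {xs : List Int} (h : xs ≠ []) (v : Int) :
    PySem.List.pySetD xs (-1) v = xs.set (xs.length - 1) v := by
  have hl : 1 ≤ xs.length := List.length_pos_of_ne_nil h
  simp [PySem.List.pySetD, PySem.List.pySet?, pyIdx?_neg_one xs.length hl]

theorem set_concat : ∀ (ys : List Int) (a v : Int), (ys ++ [a]).set ys.length v = ys ++ [v]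
  | [], a, v => rfl
  | y :: t, a, v => by
    simp only [List.cons_append, List.length_cons, List.set_cons_succ]
    rw [set_concat t a v]

theorem set_last_eq (rs : List Int) (hne : rs ≠ []) (w : Int) :
    rs.set (rs.length - 1) w = rs.dropLast ++ [w] := by
  have h := set_concat rs.dropLast (rs.getLast hne) w
  rw [List.dropLast_append_getLast hne] at h
  rw [show rs.dropLast.length = rs.length - 1 from by simp] at h
  exact h

theorem tstep_neg (rs res : List Int) (hne : rs ≠ []) (hall : ∀ x ∈ rs, x ≤ -1) :
    tstep rs res = (rs.dropLast ++ [rs.getLast hne - 1], res ++ [rs.getLast hne]) := by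
  unfold tstep
  rw [tscan_all_neg hall]
  dsimp only
  rw [PySem.List.pyGet?_neg_one, List.getLast?_eq_some_getLast hne]
  dsimp only
  rw [pySetD_neg_one hne, set_last_eq rs hne]
  have hre : PySem.List.pyGet? (rs.dropLast ++ [rs.getLast hne - 1]) (-1) = some (rs.getLast hne - 1) :=
    PySem.List.pyGet?_neg_one_append_singleton _ _
  rw [hre]
  dsimp only
  have he : rs.getLast hne - 1 + 1 = rs.getLast hne := by omega
  rw [he]

-- one agreeing round: while capacity or slack remains, A and B record the same value and
-- their states stay a sorted permutation pair with the joint potential reduced by one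
theorem step_sync (rs pool res : List Int) (hne : rs ≠ []) (hp : rs.Perm pool)
    (hs : pool.Pairwise (fun a b => b ≤ a)) (hsum : 1 ≤ capFn rs + slackFn rs) :
    ∃ rs' pool' v, tstep rs res = (rs', res ++ [v]) ∧ bstep pool res = (pool', res ++ [v]) ∧
      rs'.Perm pool' ∧ pool'.Pairwise (fun a b => b ≤ a) ∧ rs'.length = rs.length ∧
      capFn rs' + slackFn rs' + 1 = capFn rs + slackFn rs := by
  cases pool with
  | nil =>
    exfalso
    have := hp.length_eq
    simp at this
    exact hne this
  | cons top rest =>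
    by_cases hcap : 0 < capFn rs
    · -- a resource is still ≥ 0: A's scan finds the maximum
      have hx : ∃ x ∈ rs, 0 ≤ x := capFn_pos_exists hcap
      obtain ⟨c, hclen, hget, hall, hM0, hstep⟩ := tstep_spec rs res hx
      set M := (tscan rs).1 with hMdef
      have hMmem : M ∈ rs := PySem.List.mem_of_pyGet?_eq_some _ hget
      have htopM : top = M := by
        have h1 : top ≤ M := hall top (hp.mem_iff.2 List.mem_cons_self)
        have h2 : M ≤ top := by
          rcases List.mem_cons.1 (hp.mem_iff.1 hMmem) with h | h
          · omega
          · exact (List.pairwise_cons.1 hs).1 M h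
        omega
      subst htopM
      have hgetN : rs[c]? = some M := by rw [← PySem.List.pyGet?_natCast]; exact hget
      have hE : rs.Perm (M :: rs.eraseIdx c) := perm_cons_eraseIdx rs c M hgetN
      have hS : (rs.set c (M - 1)).Perm ((M - 1) :: rs.eraseIdx c) :=
        set_perm_cons_eraseIdx rs c (M - 1) hclen
      obtain ⟨bp, bs⟩ := bstep_pool M rest hs
      have hrest : (rs.eraseIdx c).Perm rest := (hE.symm.trans hp).cons_inv
      have hpool' : (rs.set c (M - 1)).Perm
          (rest.take (bk M rest) ++ (M - 1) :: rest.drop (bk M rest)) :=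
        hS.trans ((hrest.cons (M - 1)).trans bp.symm)
      have hcap' : capFn (rs.set c (M - 1)) + 1 = capFn rs := by
        rw [capFn_perm hS, capFn_perm hE, capFn_cons, capFn_cons]
        have e1 : (M - 1 + 1).toNat = M.toNat := by omega
        have e2 : (M + 1).toNat = M.toNat + 1 := by omega
        omega
      have hslack' : slackFn (rs.set c (M - 1)) = slackFn rs :=
        slack_congr (svec_set hgetN hM0)
      refine ⟨rs.set c (M - 1), _, M, hstep, rfl, hpool', bs, by simp, by omega⟩
    · -- every resource is ≤ -1: A wraps to the last explorer, which still holds the maximum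
      have hcap0 : capFn rs = 0 := by omega
      have hall : ∀ x ∈ rs, x ≤ -1 := capFn_eq_zero.1 hcap0
      have hsl : 1 ≤ slackFn rs := by omega
      have hsv : svec rs = rs := svec_eq_self hall
      have hOT : ovalFn rs ≤ tvalFn rs := by
        by_contra hc
        unfold slackFn at hsl
        rw [if_neg hc] at hsl
        omega
      have htv : tvalFn rs = rs.getLast hne := by
        unfold tvalFn
        rw [hsv, List.getLastD_eq_getLast?, List.getLast?_eq_some_getLast hne]
        rfl
      have hov : ovalFn rs = maxD rs.dropLast := by
        unfold ovalFn
        rw [hsv]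
      set T := rs.getLast hne with hTdef
      have hdecomp : rs.dropLast ++ [T] = rs := List.dropLast_append_getLast hne
      have htopT : top = T := by
        have h1 : top ≤ T := by
          have hmem : top ∈ rs := hp.mem_iff.2 List.mem_cons_self
          rw [← hdecomp] at hmem
          rcases List.mem_append.1 hmem with h | h
          · have := le_maxD _ _ h
            rw [← hov] at this
            omega
          · simp at h; omega
        have h2 : T ≤ top := by
          have hmem : T ∈ (top :: rest) := hp.mem_iff.1 (List.getLast_mem hne)
          rcases List.mem_cons.1 hmem with h | h
          · omega
          · exact (List.pairwise_cons.1 hs).1 T h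
        omega
      subst htopT
      have hstep := tstep_neg rs res hne hall
      obtain ⟨bp, bs⟩ := bstep_pool T rest hs
      have hdl_rest : rs.dropLast.Perm rest := by
        have hp2 : (rs.dropLast ++ [T]).Perm (T :: rest) := by rw [hdecomp]; exact hp
        exact ((List.perm_append_singleton T rs.dropLast).symm.trans hp2).cons_inv
      have hall' : ∀ x ∈ rs.dropLast ++ [T - 1], x ≤ -1 := by
        intro x hx
        rcases List.mem_append.1 hx with h | h
        · have h0 := List.mem_append_left [T] h
          rw [hdecomp] at h0
          exact hall x h0
        · have hT : T ≤ -1 := hall T (List.getLast_mem hne)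
          simp at h; omega
      have hpool' : (rs.dropLast ++ [T - 1]).Perm
          (rest.take (bk T rest) ++ (T - 1) :: rest.drop (bk T rest)) := by
        refine (List.perm_append_singleton (T - 1) rs.dropLast).trans ?_
        exact ((hdl_rest.cons (T - 1)).trans bp.symm)
      have hlen' : (rs.dropLast ++ [T - 1]).length = rs.length := by
        have := List.length_pos_of_ne_nil hne
        simp
        omega
      have hcap0' : capFn (rs.dropLast ++ [T - 1]) = 0 := capFn_eq_zero.2 hall'
      have hsl' : slackFn (rs.dropLast ++ [T - 1]) + 1 = slackFn rs := by
        have hsv' : svec (rs.dropLast ++ [T - 1]) = rs.dropLast ++ [T - 1] := svec_eq_self hall'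
        have htv' : tvalFn (rs.dropLast ++ [T - 1]) = T - 1 := by
          unfold tvalFn
          rw [hsv', List.getLastD_concat]
        have hov' : ovalFn (rs.dropLast ++ [T - 1]) = maxD rs.dropLast := by
          unfold ovalFn
          rw [hsv', List.dropLast_concat]
        have hOT2 : ovalFn rs ≤ T := by rw [← htv]; exact hOT
        unfold slackFn
        rw [htv', hov', ← hov, htv]
        by_cases hc : ovalFn rs ≤ T - 1
        · rw [if_pos hc, if_pos hOT2]
          omega
        · rw [if_neg hc, if_pos hOT2]
          omega
      exact ⟨rs.dropLast ++ [T - 1], _, T, hstep, rfl, hpool', bs, hlen', by omega⟩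

theorem loop_eq2 : ∀ (k : Nat) (rs pool res : List Int), rs ≠ [] → rs.Perm pool →
    pool.Pairwise (fun a b => b ≤ a) → k ≤ capFn rs + slackFn rs →
    (tloop k rs res).2 = (bloop k pool res).2 := by
  intro k
  induction k with
  | zero => intro rs pool res _ _ _ _; rfl
  | succ k ih =>
    intro rs pool res hne hp hs hk
    obtain ⟨rs', pool', v, hA, hB, hp', hs', hlen', hpot⟩ :=
      step_sync rs pool res hne hp hs (by omega)
    have hA' : tloop (k + 1) rs res = tloop k rs' (res ++ [v]) := by
      show tloop k (tstep rs res).1 (tstep rs res).2 = _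
      rw [hA]
    have hB' : bloop (k + 1) pool res = bloop k pool' (res ++ [v]) := by
      show bloop k (bstep pool res).1 (bstep pool res).2 = _
      rw [hB]
    rw [hA', hB']
    refine ih rs' pool' (res ++ [v]) ?_ hp' hs' (by omega)
    intro hnil
    rw [hnil] at hlen'
    simp at hlen'
    exact hne (List.length_eq_zero_iff.1 hlen'.symm)

theorem tloop_prefix : ∀ (k : Nat) (rs res : List Int), ∃ t, (tloop k rs res).2 = res ++ t := by
  intro k
  induction k with
  | zero => intro rs res; exact ⟨[], by simp [tloop]⟩
  | succ k ih =>
    intro rs res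
    have hstep : ∃ s, (tstep rs res).2 = res ++ s := by
      unfold tstep
      dsimp only
      cases hg : PySem.List.pyGet? rs (tscan rs).2 with
      | none => exact ⟨[], by simp⟩
      | some v =>
        cases hg2 : PySem.List.pyGet? (PySem.List.pySetD rs (tscan rs).2 (v - 1)) (tscan rs).2 with
        | none => exact ⟨[], by simp [hg2]⟩
        | some w => exact ⟨[w + 1], by simp [hg2]⟩
    obtain ⟨s, hsv⟩ := hstep
    obtain ⟨t, ht⟩ := ih (tstep rs res).1 ((tstep rs res).2)
    refine ⟨s ++ t, ?_⟩
    show (tloop k (tstep rs res).1 (tstep rs res).2).2 = _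
    rw [ht, hsv, List.append_assoc]

theorem bloop_prefix : ∀ (k : Nat) (pool res : List Int), ∃ t, (bloop k pool res).2 = res ++ t := by
  intro k
  induction k with
  | zero => intro pool res; exact ⟨[], by simp [bloop]⟩
  | succ k ih =>
    intro pool res
    have hstep : ∃ s, (bstep pool res).2 = res ++ s := by
      cases pool with
      | nil => exact ⟨[], by simp [bstep]⟩
      | cons top rest => exact ⟨[top], rfl⟩
    obtain ⟨s, hsv⟩ := hstep
    obtain ⟨t, ht⟩ := ih (bstep pool res).1 ((bstep pool res).2)
    refine ⟨s ++ t, ?_⟩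
    show (bloop k (bstep pool res).1 (bstep pool res).2).2 = _
    rw [ht, hsv, List.append_assoc]

-- the differing round: capacity and slack exhausted, the last explorer no longer holds the maximum
theorem loop_ne : ∀ (k : Nat) (rs pool res : List Int), rs.Perm pool →
    pool.Pairwise (fun a b => b ≤ a) → 2 ≤ rs.length →
    capFn rs + slackFn rs < k → (tloop k rs res).2 ≠ (bloop k pool res).2 := by
  intro k
  induction k with
  | zero => intro rs pool res _ _ _ h; omega
  | succ k ih =>
    intro rs pool res hp hs hlen hk
    have hne : rs ≠ [] := by
      intro h; rw [h] at hlen; simp at hlen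
    by_cases hsum : 1 ≤ capFn rs + slackFn rs
    · obtain ⟨rs', pool', v, hA, hB, hp', hs', hlen', hpot⟩ :=
        step_sync rs pool res hne hp hs hsum
      have hA' : tloop (k + 1) rs res = tloop k rs' (res ++ [v]) := by
        show tloop k (tstep rs res).1 (tstep rs res).2 = _
        rw [hA]
      have hB' : bloop (k + 1) pool res = bloop k pool' (res ++ [v]) := by
        show bloop k (bstep pool res).1 (bstep pool res).2 = _
        rw [hB]
      rw [hA', hB']
      exact ih rs' pool' (res ++ [v]) hp' hs' (by omega) (by omega)
    · -- the exhausted, out-of-slack state: A records the last value, B the (strictly larger) maximum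
      have hcap0 : capFn rs = 0 := by omega
      have hsl0 : slackFn rs = 0 := by omega
      have hall : ∀ x ∈ rs, x ≤ -1 := capFn_eq_zero.1 hcap0
      have hsv : svec rs = rs := svec_eq_self hall
      have htv : tvalFn rs = rs.getLast hne := by
        unfold tvalFn
        rw [hsv, List.getLastD_eq_getLast?, List.getLast?_eq_some_getLast hne]
        rfl
      have hov : ovalFn rs = maxD rs.dropLast := by
        unfold ovalFn
        rw [hsv]
      set T := rs.getLast hne with hTdef
      have hdecomp : rs.dropLast ++ [T] = rs := List.dropLast_append_getLast hne
      have hdlne : rs.dropLast ≠ [] := by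
        intro h
        rw [h] at hdecomp
        rw [← hdecomp] at hlen
        simp at hlen
      have hTO : T < maxD rs.dropLast := by
        by_contra hc
        have hOT : ovalFn rs ≤ tvalFn rs := by rw [htv, hov]; omega
        unfold slackFn at hsl0
        rw [if_pos hOT, htv, hov] at hsl0
        omega
      cases pool with
      | nil =>
        exfalso
        have := hp.length_eq
        rw [this] at hlen
        simp at hlen
      | cons top rest =>
        have htopO : top = maxD rs.dropLast := by
          have h1 : top ≤ maxD rs.dropLast := by
            have hmem : top ∈ rs := hp.mem_iff.2 List.mem_cons_self
            rw [← hdecomp] at hmem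
            rcases List.mem_append.1 hmem with h | h
            · exact le_maxD _ _ h
            · simp at h; omega
          have h2 : maxD rs.dropLast ≤ top := by
            have hmem : maxD rs.dropLast ∈ rs := by
              have h0 := List.mem_append_left [T] (maxD_mem rs.dropLast hdlne)
              rw [hdecomp] at h0
              exact h0
            rcases List.mem_cons.1 (hp.mem_iff.1 hmem) with h | h
            · omega
            · exact (List.pairwise_cons.1 hs).1 _ h
          omega
        have hA' : tloop (k + 1) rs res = tloop k (rs.dropLast ++ [T - 1]) (res ++ [T]) := by
          show tloop k (tstep rs res).1 (tstep rs res).2 = _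
          rw [tstep_neg rs res hne hall]
        have hB' : bloop (k + 1) (top :: rest) res =
            bloop k (rest.take (bk top rest) ++ (top - 1) :: rest.drop (bk top rest)) (res ++ [top]) := rfl
        rw [hA', hB']
        obtain ⟨tA, htA⟩ := tloop_prefix k (rs.dropLast ++ [T - 1]) (res ++ [T])
        obtain ⟨tB, htB⟩ := bloop_prefix k (rest.take (bk top rest) ++ (top - 1) :: rest.drop (bk top rest)) (res ++ [top])
        rw [htA, htB]
        intro hcontra
        rw [List.append_assoc, List.append_assoc] at hcontra
        have := List.append_cancel_left hcontra
        have hTtop : T = top := by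
          have h1 := congrArg (fun l => l.head?) this
          simp at h1
          exact h1
        omega

theorem bstep_single (x : Int) (res : List Int) : bstep [x] res = ([x - 1], res ++ [x]) := by
  simp [bstep, bk]

theorem pySetD_single_neg_one (x v : Int) : PySem.List.pySetD [x] (-1) v = [v] := by
  have h : PySem.List.pyIdx? 1 (-1) = some 0 := by decide
  simp [PySem.List.pySetD, PySem.List.pySet?, h]

theorem tfun_some {rs : List Int} {i v : Int} (st : Int × Int)
    (h : PySem.List.pyGet? rs i = some v) :
    tfun rs st i = if v > st.1 then (v, i) else if v = st.1 ∧ i < st.2 then (st.1, i) else st := by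
  unfold tfun
  rw [h]

theorem tscan_single (x : Int) : tscan [x] = if x > -1 then (x, (0 : Int)) else (-1, -1) := by
  unfold tscan
  have h1 : (([x].length : Int)) = 1 := by simp
  rw [h1, PySem.List.pyRange_one_cons (by norm_num), PySem.List.pyRange_one_eq_nil (by norm_num),
    List.foldl_cons, List.foldl_nil]
  rw [tfun_some _ (PySem.List.pyGet?_zero_cons x [])]
  by_cases hx : x > -1
  · simp [hx]
  · have h2 : ¬ (x = (-1 : Int) ∧ ((0 : Int) < (-1 : Int))) := by rintro ⟨-, h⟩; omega
    simp only [if_neg hx, if_neg h2]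

theorem loop_single (k : Nat) : ∀ (x : Int) (res : List Int),
    (tloop k [x] res).2 = (bloop k [x] res).2 := by
  induction k with
  | zero => intro x res; rfl
  | succ k ih =>
    intro x res
    have hA : tstep [x] res = ([x - 1], res ++ [x]) := by
      unfold tstep
      rw [tscan_single]
      by_cases hx : x > -1
      · rw [if_pos hx]
        dsimp only
        rw [PySem.List.pyGet?_zero_cons]
        dsimp only
        have hsd : PySem.List.pySetD [x] (0 : Int) (x - 1) = [x - 1] := by
          rw [show ((0 : Int)) = ((0 : Nat) : Int) from rfl, PySem.List.pySetD_natCast]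
          rfl
        rw [hsd, PySem.List.pyGet?_zero_cons]
        dsimp only
        have he : x - 1 + 1 = x := by omega
        rw [he]
      · rw [if_neg hx]
        dsimp only
        rw [PySem.List.pyGet?_neg_one]
        have hlast : ([x] : List Int).getLast? = some x := rfl
        rw [hlast]
        dsimp only
        rw [pySetD_single_neg_one]
        rw [PySem.List.pyGet?_neg_one]
        have hlast2 : ([x - 1] : List Int).getLast? = some (x - 1) := rfl
        rw [hlast2]
        dsimp only
        have he : x - 1 + 1 = x := by omega
        rw [he]
    have hB : bstep [x] res = ([x - 1], res ++ [x]) := bstep_single x res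
    show (tloop k (tstep [x] res).1 (tstep [x] res).2).2 = (bloop k (bstep [x] res).1 (bstep [x] res).2).2
    rw [hA, hB]
    exact ih (x - 1) (res ++ [x])


theorem sorted_single (x : Int) : PySem.List.sorted [x] (fun y => y) true = [x] := by
  apply PySem.List.sorted_rev_eq_self_of_pairwise
  simp

-- ===== VERDICT (by name: the statement is the Claim_ definition above) =====
theorem treasure_hunt_spec : Claim_unchanged_treasure_hunt := by
  intro n rs hdom hpre hnd
  unfold treasure_hunt treasure_hunt_alt
  cases rs with
  | nil =>
    have hn : n ≤ 0 := by
      rcases hpre with h | h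
      · exact absurd rfl h
      · exact h
    have : n.toNat = 0 := by omega
    rw [this]
    rfl
  | cons a t =>
    cases t with
    | nil =>
      rw [sorted_single]
      exact loop_single n.toNat a []
    | cons b t2 =>
      have hlen : 2 ≤ (a :: b :: t2).length := by simp
      have hcap : n ≤ (potFn (a :: b :: t2) : Int) := by
        by_contra h
        exact hnd ⟨hlen, by omega⟩
      have hpe := potFn_eq (a :: b :: t2)
      have hk : n.toNat ≤ capFn (a :: b :: t2) + slackFn (a :: b :: t2) := by omega
      exact loop_eq2 n.toNat _ _ [] (by simp) (PySem.List.sorted_perm _ _ _).symm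
        (PySem.List.sorted_pairwise_rev _ _) hk

theorem treasure_hunt_changed : Claim_changed_treasure_hunt := by
  unfold Claim_changed_treasure_hunt; decide

theorem treasure_hunt_tight : Claim_exact_treasure_hunt := by
  intro n rs hdom hpre hD
  obtain ⟨hlen, hlt⟩ := hD
  unfold treasure_hunt treasure_hunt_alt
  have hpe := potFn_eq rs
  have hk : capFn rs + slackFn rs < n.toNat := by omega
  exact loop_ne n.toNat rs _ [] (PySem.List.sorted_perm _ _ _).symm
    (PySem.List.sorted_pairwise_rev _ _) hlen hk
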